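-- pv_equiv track=rewrite | github.com/charon25/ProjectEuler | 11.py | get_max_product
-- ===== SOURCE A (Python) =====
-- N = 20
--
-- def get_max_product(row, length=N):
--     if length < 4:
--         product = 1
--         for i in range(length):
--             product *= row[i]
--         return product
--
--     max_product = 0
--
--     product = row[0] * row[1] * row[2] * row[3]
--     if product > max_product:
--         max_product = product
--
--     for x in range(4, length):
--         if row[x - 4] != 0:
--             product = (product // row[x - 4]) * row[x]
--         else:
--             product = row[x] * row[x - 1] * row[x - 2] * row[x - 3]
--         if product > max_product:
--             max_product = product
--
--     return max_product
-- ===== SOURCE B (Python) =====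
-- N = 20
--
-- def get_max_product(row, length=N):
--     if length < 4:
--         product = 1
--         for i in range(length):
--             product *= row[i]
--         return product
--     max_product = 0
--     for x in range(length - 3):
--         p = row[x] * row[x + 1] * row[x + 2] * row[x + 3]
--         if p > max_product:
--             max_product = p
--     return max_product
-- ===== Notes on version B (the rewrite author's own statement) =====
-- stated objective: simpler
-- what changed: Replaced A's incremental sliding-window (divide out the leaving element, with a special recompute branch when it is zero) by a direct loop over window starts that recomputes each 4-element product from scratch, eliminating the division and the zero special-case.
import Mathlib
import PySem

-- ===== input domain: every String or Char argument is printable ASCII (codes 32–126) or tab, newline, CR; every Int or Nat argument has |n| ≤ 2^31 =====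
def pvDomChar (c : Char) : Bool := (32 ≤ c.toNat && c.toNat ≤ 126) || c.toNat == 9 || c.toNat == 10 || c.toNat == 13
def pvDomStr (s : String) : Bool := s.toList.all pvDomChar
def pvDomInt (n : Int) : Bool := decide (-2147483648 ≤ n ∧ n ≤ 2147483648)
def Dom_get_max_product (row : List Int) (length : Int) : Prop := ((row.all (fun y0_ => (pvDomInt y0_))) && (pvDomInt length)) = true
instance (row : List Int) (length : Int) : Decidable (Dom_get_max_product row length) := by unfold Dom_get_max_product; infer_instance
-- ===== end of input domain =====

-- B replaces A's divide-out sliding window (with its zero special-case) by recomputing each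
-- 4-element window product directly; objective: simpler (no division, no zero branch).


-- ===== PORT A =====
-- row[i] for an in-range index (Pre_ guarantees in-range; out of range Python raises IndexError)
def pvGet (row : List Int) (i : Int) : Int := (PySem.List.pyGet? row i).getD 0

-- body of A's `for x in range(4, length)` loop, state = (product, max_product)
def pvStepA (row : List Int) (st : Int × Int) (x : Int) : Int × Int :=
  let product :=
    if pvGet row (x - 4) ≠ 0 then
      (PySem.Int.floordiv st.1 (pvGet row (x - 4))) * pvGet row x
    else
      pvGet row x * pvGet row (x - 1) * pvGet row (x - 2) * pvGet row (x - 3)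
  (product, if product > st.2 then product else st.2)

def get_max_product (row : List Int) (length : Int) : Int :=
  if length < 4 then
    (PySem.List.pyRange 0 length 1).foldl (fun product i => product * pvGet row i) 1
  else
    let product := pvGet row 0 * pvGet row 1 * pvGet row 2 * pvGet row 3
    let max_product := if product > 0 then product else 0
    ((PySem.List.pyRange 4 length 1).foldl (pvStepA row) (product, max_product)).2

-- ===== PORT B =====
-- body of B's `for x in range(length - 3)` loop, state = max_product
def pvStepB (row : List Int) (m : Int) (x : Int) : Int :=
  let p := pvGet row x * pvGet row (x + 1) * pvGet row (x + 2) * pvGet row (x + 3)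
  if p > m then p else m

def get_max_product_alt (row : List Int) (length : Int) : Int :=
  if length < 4 then
    (PySem.List.pyRange 0 length 1).foldl (fun product i => product * pvGet row i) 1
  else
    (PySem.List.pyRange 0 (length - 3) 1).foldl (pvStepB row) 0

-- ===== PRECONDITION & SPEC =====
-- Pre_ excludes exactly the inputs on which Python A raises IndexError: length > len(row).
def Pre_get_max_product (row : List Int) (length : Int) : Prop := length ≤ (row.length : Int)
instance (row : List Int) (length : Int) : Decidable (Pre_get_max_product row length) := by
  unfold Pre_get_max_product; infer_instance

def pvWitness_get_max_product : List Int × Int := ([1, 2, 3, 4, 5], 5)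

def Spec_get_max_product (row : List Int) (length : Int) (out : Int) : Prop := out = get_max_product_alt row length
instance (row : List Int) (length : Int) (out : Int) : Decidable (Spec_get_max_product row length out) := by unfold Spec_get_max_product; infer_instance

-- ===== CLAIM (what is proved, stated in full; the proofs are below) =====
def Claim_equal_get_max_product : Prop := ∀ (row : List Int) (length : Int), Dom_get_max_product row length → Pre_get_max_product row length → Spec_get_max_product row length (get_max_product row length)

-- ===== LEMMAS AND PROOFS =====

-- product of the 4-element window starting at x
def pvWin (row : List Int) (x : Int) : Int :=
  pvGet row x * pvGet row (x + 1) * pvGet row (x + 2) * pvGet row (x + 3)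

lemma pvStepA_eq (row : List Int) (st : Int × Int) (x : Int) (h : st.1 = pvWin row (x - 4)) :
    pvStepA row st x
      = (pvWin row (x - 3), if pvWin row (x - 3) > st.2 then pvWin row (x - 3) else st.2) := by
  have e1 : x - 4 + 1 = x - 3 := by ring
  have e2 : x - 4 + 2 = x - 2 := by ring
  have e3 : x - 4 + 3 = x - 1 := by ring
  have f1 : x - 3 + 1 = x - 2 := by ring
  have f2 : x - 3 + 2 = x - 1 := by ring
  have f3 : x - 3 + 3 = x := by ring
  unfold pvStepA
  by_cases h0 : pvGet row (x - 4) = 0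
  · simp only [h0, ne_eq, not_true_eq_false, if_false]
    have : pvGet row x * pvGet row (x - 1) * pvGet row (x - 2) * pvGet row (x - 3)
        = pvWin row (x - 3) := by
      unfold pvWin; rw [f1, f2, f3]; ring
    rw [this]
  · simp only [ne_eq, h0, not_false_eq_true, if_true]
    have hst : st.1 = pvGet row (x - 4) *
        (pvGet row (x - 3) * pvGet row (x - 2) * pvGet row (x - 1)) := by
      rw [h]; unfold pvWin; rw [e1, e2, e3]; ring
    have hdiv : PySem.Int.floordiv st.1 (pvGet row (x - 4))
        = pvGet row (x - 3) * pvGet row (x - 2) * pvGet row (x - 1) := by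
      rw [hst]
      simp only [PySem.Int.floordiv]
      exact Int.mul_fdiv_cancel_left _ h0
    rw [hdiv]
    have : pvGet row (x - 3) * pvGet row (x - 2) * pvGet row (x - 1) * pvGet row x
        = pvWin row (x - 3) := by
      unfold pvWin; rw [f1, f2, f3]
    rw [this]

lemma pvLoop (row : List Int) (n : Nat) (m : Int) :
    (PySem.List.pyRange 4 (4 + (n : Int)) 1).foldl (pvStepA row) (pvWin row 0, m)
      = (pvWin row (n : Int), (PySem.List.pyRange 1 ((n : Int) + 1) 1).foldl (pvStepB row) m) := by
  induction n generalizing m with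
  | zero =>
      simp [PySem.List.pyRange_one_eq_nil]
  | succ k ih =>
      have h1 : PySem.List.pyRange 4 (4 + ((k : Int) + 1)) 1
          = PySem.List.pyRange 4 (4 + (k : Int)) 1 ++ [4 + (k : Int)] := by
        have := PySem.List.pyRange_one_succ_right (a := 4) (b := 4 + (k : Int)) (by omega)
        rw [show (4 + ((k : Int) + 1)) = (4 + (k : Int)) + 1 by ring, this]
      have h2 : PySem.List.pyRange 1 (((k : Int) + 1) + 1) 1
          = PySem.List.pyRange 1 ((k : Int) + 1) 1 ++ [(k : Int) + 1] := by
        exact PySem.List.pyRange_one_succ_right (a := 1) (b := (k : Int) + 1) (by omega)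
      push_cast
      rw [h1, h2, List.foldl_append, List.foldl_append, ih]
      simp only [List.foldl_cons, List.foldl_nil]
      rw [pvStepA_eq row _ (4 + (k : Int))
        (by rw [show (4 + (k : Int) - 4) = (k : Int) by ring])]
      rw [show (4 + (k : Int) - 3) = (k : Int) + 1 by ring]
      simp [pvStepB, pvWin]

-- ===== VERDICT (by name: the statement is the Claim_ definition above) =====
theorem get_max_product_spec : Claim_equal_get_max_product := by
  intro row length _ _
  unfold Spec_get_max_product get_max_product get_max_product_alt
  by_cases hl : length < 4
  · simp [hl]
  · simp only [hl, if_false]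
    have hn : length = 4 + (((length - 4).toNat : Nat) : Int) := by omega
    set n : Nat := (length - 4).toNat with hndef
    have hinit : pvGet row 0 * pvGet row 1 * pvGet row 2 * pvGet row 3 = pvWin row 0 := by
      unfold pvWin; norm_num
    rw [hinit]
    rw [hn]
    have hB : PySem.List.pyRange 0 (4 + (n : Int) - 3) 1
        = 0 :: PySem.List.pyRange 1 ((n : Int) + 1) 1 := by
      rw [show (4 + (n : Int) - 3) = (n : Int) + 1 by ring]
      exact PySem.List.pyRange_one_cons (by omega)
    rw [hB]
    have hstart : (if pvWin row 0 > 0 then pvWin row 0 else 0) = pvStepB row 0 0 := by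
      unfold pvStepB pvWin; norm_num
    rw [hstart, List.foldl_cons, pvLoop]
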